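-- pv_equiv track=rewrite | github.com/visualcomments/agents_4_puzzles | competitions/lrx-discover-math-gods-algorithm/solve_module.py | solve
-- ===== SOURCE A (Python) =====
-- from typing import List, Tuple, Any
--
-- def _apply_L(a: List[Any]) -> None:
--     """Left cyclic shift by 1 (in-place) WITHOUT slicing."""
--     n = len(a)
--     if n <= 1:
--         return
--     first = a[0]
--     i = 0
--     while i < n - 1:
--         a[i] = a[i + 1]
--         i += 1
--     a[n - 1] = first
--
-- def _apply_R(a: List[Any]) -> None:
--     """Right cyclic shift by 1 (in-place) WITHOUT slicing."""
--     n = len(a)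
--     if n <= 1:
--         return
--     last = a[n - 1]
--     i = n - 1
--     while i > 0:
--         a[i] = a[i - 1]
--         i -= 1
--     a[0] = last
--
-- def _apply_X(a: List[Any]) -> None:
--     """Swap a[0] and a[1] (in-place)."""
--     if len(a) >= 2:
--         a[0], a[1] = a[1], a[0]
--
-- def _rot_left(a: List[Any], k: int, moves: List[str]) -> None:
--     """Apply L k times; append moves immediately."""
--     n = len(a)
--     if n <= 1:
--         return
--     k = k % n
--     i = 0
--     while i < k:
--         _apply_L(a)
--         moves.append("L")
--         i += 1
--
-- def _rot_right(a: List[Any], k: int, moves: List[str]) -> None: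
--     """Apply R k times; append moves immediately."""
--     n = len(a)
--     if n <= 1:
--         return
--     k = k % n
--     i = 0
--     while i < k:
--         _apply_R(a)
--         moves.append("R")
--         i += 1
--
-- def _adjacent_swap(a: List[Any], i: int, moves: List[str]) -> None:
--     """Swap positions (i, i+1) using only L/R/X; append moves immediately."""
--     n = len(a)
--     if n < 2:
--         return
--     if not (0 <= i < n - 1):
--         raise ValueError(f"adjacent_swap index out of range: i={i}, n={n}")
--
--     # Bring i to front, swap, restore
--     _rot_left(a, i, moves)
--     _apply_X(a)
--     moves.append("X")
--     _rot_right(a, i, moves)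
--
-- def solve(vec: List[Any]) -> Tuple[List[str], List[Any]]:
--     """
--     Return (moves, sorted_array).
--     The returned moves, when applied sequentially to a copy of vec, produce sorted_array.
--     """
--     a = list(vec)  # allowed copy to simulate sorting
--     moves: List[str] = []
--     n = len(a)
--     if n <= 1:
--         return moves, a
--
--     # Bubble-sort via constructive adjacent swaps
--     pass_idx = 0
--     while pass_idx < n:
--         swapped = False
--         i = 0
--         while i < n - 1:
--             if a[i] > a[i + 1]:
--                 _adjacent_swap(a, i, moves)
--                 swapped = True
--             i += 1
--         if not swapped:
--             break
--         pass_idx += 1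
--
--     return moves, a
-- ===== SOURCE B (Python) =====
-- from typing import List, Tuple, Any
--
-- def solve(vec: List[Any]) -> Tuple[List[str], List[Any]]:
--     """Bubble sort with O(1) swaps; each swap at i emits i L's, one X, i R's directly."""
--     a = list(vec)
--     moves: List[str] = []
--     n = len(a)
--     if n <= 1:
--         return moves, a
--     for _ in range(n):
--         swapped = False
--         for i in range(n - 1):
--             if a[i] > a[i + 1]:
--                 a[i], a[i + 1] = a[i + 1], a[i]
--                 moves.extend(["L"] * i)
--                 moves.append("X")
--                 moves.extend(["R"] * i)
--                 swapped = True
--         if not swapped: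
--             break
--     return moves, a
-- ===== Notes on version B (the rewrite author's own statement) =====
-- stated objective: faster
-- what changed: B performs each bubble-sort swap in O(1) and emits the move pattern (i L's, one X, i R's) directly, instead of A's realizing every single L/R move by an O(n) in-place rotation of the array.
import Mathlib
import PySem

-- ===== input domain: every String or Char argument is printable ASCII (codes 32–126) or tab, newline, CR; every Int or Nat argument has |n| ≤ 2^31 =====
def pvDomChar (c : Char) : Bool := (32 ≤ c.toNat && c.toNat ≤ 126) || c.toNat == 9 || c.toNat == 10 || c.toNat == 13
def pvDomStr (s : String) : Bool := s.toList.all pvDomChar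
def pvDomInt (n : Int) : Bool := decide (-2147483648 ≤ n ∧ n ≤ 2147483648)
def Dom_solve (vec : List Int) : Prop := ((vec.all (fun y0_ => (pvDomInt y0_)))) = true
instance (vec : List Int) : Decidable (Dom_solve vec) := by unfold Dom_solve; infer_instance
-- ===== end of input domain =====

-- B replaces A's per-move O(n) in-place rotations by an O(1) swap plus direct emission
-- of the move pattern (i L's, X, i R's); objective: faster (asymptotic).
-- A mutates only its local copy of vec, so return-value equivalence is full equivalence.

-- ===== PORT A =====
-- _apply_L: in-place left cyclic shift by 1 (the while loop shifts every element
-- one slot left and puts the old first element last; on length ≤ 1 it returns unchanged,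
-- which the h :: t branch also computes for singletons).
def applyL (a : List Int) : List Int :=
  if a.length ≤ 1 then a
  else match a with
    | [] => []
    | h :: t => t ++ [h]

-- _apply_R: in-place right cyclic shift by 1 (last element moves to the front).
def applyR (a : List Int) : List Int :=
  if a.length ≤ 1 then a
  else match a.getLast? with
    | none => a
    | some last => last :: a.dropLast

-- _apply_X: swap a[0] and a[1] when len ≥ 2.
def applyX (a : List Int) : List Int :=
  match a with
  | x :: y :: t => y :: x :: t
  | _ => a

-- the `while i < k` loop of _rot_left: apply L, append "L", k times
def rotLoopL : Nat → List Int → List String → List Int × List String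
  | 0, a, m => (a, m)
  | k + 1, a, m => rotLoopL k (applyL a) (m ++ ["L"])

-- _rot_left (k is A's non-negative loop index i, so k % n is Nat mod, as in Python)
def rotLeftA (a : List Int) (k : Nat) (m : List String) : List Int × List String :=
  if a.length ≤ 1 then (a, m) else rotLoopL (k % a.length) a m

def rotLoopR : Nat → List Int → List String → List Int × List String
  | 0, a, m => (a, m)
  | k + 1, a, m => rotLoopR k (applyR a) (m ++ ["R"])

-- _rot_right
def rotRightA (a : List Int) (k : Nat) (m : List String) : List Int × List String :=
  if a.length ≤ 1 then (a, m) else rotLoopR (k % a.length) a m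

-- _adjacent_swap; the `raise ValueError` branch is never reached from solve
-- (solve only calls it with 0 ≤ i < n-1); the port returns the state unchanged there.
def adjacentSwapA (a : List Int) (i : Nat) (m : List String) : List Int × List String :=
  if a.length < 2 then (a, m)
  else if ¬ (i < a.length - 1) then (a, m)  -- unreachable from solve (raise in Python)
  else
    let (a1, m1) := rotLeftA a i m
    let a2 := applyX a1
    let m2 := m1 ++ ["X"]
    rotRightA a2 i m2

-- inner `while i < n - 1` loop of solve (a[i] indexing is always in range here)
def innerA (n : Nat) (i : Nat) (a : List Int) (m : List String) (sw : Bool) :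
    List Int × List String × Bool :=
  if _h : i < n - 1 then
    if a.getD i 0 > a.getD (i + 1) 0 then
      let (a', m') := adjacentSwapA a i m
      innerA n (i + 1) a' m' true
    else
      innerA n (i + 1) a m sw
  else (a, m, sw)
termination_by n - 1 - i

-- outer `while pass_idx < n` loop of solve
def outerA (n : Nat) : Nat → List Int → List String → List Int × List String
  | 0, a, m => (a, m)
  | fuel + 1, a, m =>
    let (a', m', sw) := innerA n 0 a m false
    if sw then outerA n fuel a' m' else (a', m')

def solve (vec : List Int) : List String × List Int :=
  let a := vec
  let n := a.length
  if n ≤ 1 then ([], a)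
  else
    let (a', m') := outerA n n a []
    (m', a')

-- ===== PORT B =====
-- inner `for i in range(n-1)` loop of B: direct swap, direct move pattern
def innerB (n : Nat) (i : Nat) (a : List Int) (m : List String) (sw : Bool) :
    List Int × List String × Bool :=
  if _h : i < n - 1 then
    if a.getD i 0 > a.getD (i + 1) 0 then
      let x := a.getD i 0
      let y := a.getD (i + 1) 0
      let a' := (a.set i y).set (i + 1) x
      let m' := m ++ List.replicate i "L" ++ ["X"] ++ List.replicate i "R"
      innerB n (i + 1) a' m' true
    else
      innerB n (i + 1) a m sw
  else (a, m, sw)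
termination_by n - 1 - i

-- outer `for _ in range(n)` loop with break
def outerB (n : Nat) : Nat → List Int → List String → List Int × List String
  | 0, a, m => (a, m)
  | fuel + 1, a, m =>
    let (a', m', sw) := innerB n 0 a m false
    if sw then outerB n fuel a' m' else (a', m')

def solve_alt (vec : List Int) : List String × List Int :=
  let a := vec
  let n := a.length
  if n ≤ 1 then ([], a)
  else
    let (a', m') := outerB n n a []
    (m', a')

-- ===== PRECONDITION & SPEC =====
def Spec_solve (vec : List Int) (out : List String × List Int) : Prop := out = solve_alt vec
instance (vec : List Int) (out : List String × List Int) : Decidable (Spec_solve vec out) := by unfold Spec_solve; infer_instance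

-- ===== CLAIM (what is proved, stated in full; the proofs are below) =====
def Claim_equal_solve : Prop := ∀ (vec : List Int), Dom_solve vec → Spec_solve vec (solve vec)

-- ===== LEMMAS AND PROOFS =====

theorem applyL_eq (a : List Int) : applyL a = a.drop 1 ++ a.take 1 := by
  match a with
  | [] => rfl
  | [x] => rfl
  | x :: y :: t => simp [applyL]

theorem applyR_applyL (a : List Int) : applyR (applyL a) = a := by
  match a with
  | [] => rfl
  | [x] => rfl
  | x :: y :: t =>
    have h1 : applyL (x :: y :: t) = (y :: t) ++ [x] := by simp [applyL]
    rw [h1, applyR, if_neg (by simp), List.getLast?_concat, List.dropLast_concat]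

theorem applyL_iterate (k : Nat) (a : List Int) (hk : k ≤ a.length) :
    applyL^[k] a = a.drop k ++ a.take k := by
  induction k generalizing a with
  | zero => simp
  | succ k ih =>
    rw [Function.iterate_succ_apply', ih a (by omega), applyL_eq]
    have hd : a.drop k = a[k] :: a.drop (k + 1) := List.drop_eq_getElem_cons (by omega)
    have ht : a.take (k + 1) = a.take k ++ [a[k]] := by
      rw [List.take_add_one, List.getElem?_eq_getElem (show k < a.length by omega)]
      rfl
    rw [hd, ht]
    simp only [List.cons_append, List.drop_succ_cons, List.drop_zero, List.take_succ_cons,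
      List.take_zero, List.append_assoc]

theorem applyR_iterate_applyL_iterate (k : Nat) (a : List Int) :
    applyR^[k] (applyL^[k] a) = a := by
  induction k generalizing a with
  | zero => rfl
  | succ k ih =>
    rw [Function.iterate_succ_apply, Function.iterate_succ_apply']
    rw [applyR_applyL, ih]

theorem rotLoopL_eq (k : Nat) (a : List Int) (m : List String) :
    rotLoopL k a m = (applyL^[k] a, m ++ List.replicate k "L") := by
  induction k generalizing a m with
  | zero => simp [rotLoopL]
  | succ k ih =>
    rw [rotLoopL, ih, Function.iterate_succ_apply]
    simp [List.replicate_succ]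

theorem rotLoopR_eq (k : Nat) (a : List Int) (m : List String) :
    rotLoopR k a m = (applyR^[k] a, m ++ List.replicate k "R") := by
  induction k generalizing a m with
  | zero => simp [rotLoopR]
  | succ k ih =>
    rw [rotLoopR, ih, Function.iterate_succ_apply]
    simp [List.replicate_succ]

-- the swapped-list characterisation used by B
theorem set_set_swap (u v : List Int) (x y : Int) :
    (((u ++ x :: y :: v).set u.length y).set (u.length + 1) x) = u ++ y :: x :: v := by
  induction u with
  | nil => simp
  | cons h t ih =>
    simp only [List.cons_append, List.length_cons, List.set_cons_succ]
    rw [ih]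

-- key lemma: A's constructive adjacent swap = B's direct swap + direct move pattern
theorem adjacentSwapA_eq (u v : List Int) (x y : Int) (m : List String) :
    adjacentSwapA (u ++ x :: y :: v) u.length m =
      (u ++ y :: x :: v, m ++ List.replicate u.length "L" ++ ["X"] ++ List.replicate u.length "R") := by
  set a := u ++ x :: y :: v with ha
  have hlen : a.length = u.length + v.length + 2 := by simp [ha]; omega
  have h2 : ¬ a.length < 2 := by omega
  have hi : u.length < a.length - 1 := by omega
  have hg1 : ¬ a.length ≤ 1 := by omega
  rw [adjacentSwapA, if_neg h2, if_neg (by omega : ¬ ¬ (u.length < a.length - 1))]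
  rw [rotLeftA, if_neg hg1]
  rw [Nat.mod_eq_of_lt (by omega), rotLoopL_eq]
  have hL : applyL^[u.length] a = x :: y :: (v ++ u) := by
    rw [applyL_iterate _ _ (by omega)]
    rw [ha, List.drop_append_of_le_length (by omega), List.take_append_of_le_length (by omega)]
    simp
  simp only []
  rw [rotRightA]
  have hlen2 : (applyX (applyL^[u.length] a)).length = a.length := by
    rw [hL]; simp [applyX, hlen]; omega
  rw [if_neg (by omega : ¬ (applyX (applyL^[u.length] a)).length ≤ 1)]
  rw [hlen2, Nat.mod_eq_of_lt (by omega), rotLoopR_eq]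
  have hX : applyX (applyL^[u.length] a) = applyL^[u.length] (u ++ y :: x :: v) := by
    rw [hL, applyL_iterate _ _ (by simp)]
    rw [List.drop_append_of_le_length (by omega), List.take_append_of_le_length (by omega)]
    simp [applyX]
  rw [hX, applyR_iterate_applyL_iterate]

-- decomposition of a list around two adjacent in-range positions
theorem exists_decomp (a : List Int) (i : Nat) (h : i + 1 < a.length) :
    ∃ u x y v, a = u ++ x :: y :: v ∧ u.length = i := by
  refine ⟨a.take i, a[i], a[i+1], a.drop (i+2), ?_, by simp; omega⟩
  have h1 : a.drop i = a[i] :: a.drop (i+1) := List.drop_eq_getElem_cons (by omega)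
  have h2 : a.drop (i+1) = a[i+1] :: a.drop (i+2) := List.drop_eq_getElem_cons (by omega)
  conv_lhs => rw [← List.take_append_drop i a]
  rw [h1, h2]

theorem innerA_eq_innerB (n i : Nat) (a : List Int) (m : List String) (sw : Bool)
    (hn : a.length = n) : innerA n i a m sw = innerB n i a m sw := by
  by_cases h : i < n - 1
  · rw [innerA, innerB, dif_pos h, dif_pos h]
    obtain ⟨u, x, y, v, hdec, hu⟩ := exists_decomp a i (by omega)
    have hx : a.getD i 0 = x := by rw [hdec, ← hu]; simp
    have hy : a.getD (i + 1) 0 = y := by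
      rw [hdec, ← hu]
      rw [List.getD_eq_getElem?_getD]
      simp
    by_cases hgt : a.getD i 0 > a.getD (i + 1) 0
    · rw [if_pos hgt, if_pos hgt]
      have hswap : adjacentSwapA a i m =
          (u ++ y :: x :: v, m ++ List.replicate i "L" ++ ["X"] ++ List.replicate i "R") := by
        rw [hdec, ← hu, adjacentSwapA_eq]
      have hset : (a.set i (a.getD (i+1) 0)).set (i+1) (a.getD i 0) = u ++ y :: x :: v := by
        rw [hx, hy, hdec, ← hu, set_set_swap]
      rw [hswap]
      simp only [hset]
      exact innerA_eq_innerB n (i + 1) _ _ true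
        (by rw [← hset]; simp [hn])
    · rw [if_neg hgt, if_neg hgt]
      exact innerA_eq_innerB n (i + 1) a m sw hn
  · rw [innerA, innerB, dif_neg h, dif_neg h]
termination_by n - 1 - i

theorem innerB_length (n i : Nat) (a : List Int) (m : List String) (sw : Bool)
    (hn : a.length = n) : (innerB n i a m sw).1.length = n := by
  by_cases h : i < n - 1
  · rw [innerB, dif_pos h]
    by_cases hgt : a.getD i 0 > a.getD (i + 1) 0
    · rw [if_pos hgt]
      exact innerB_length n (i + 1) _ _ true (by simp [hn])
    · rw [if_neg hgt]
      exact innerB_length n (i + 1) a m sw hn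
  · rw [innerB, dif_neg h]; exact hn
termination_by n - 1 - i

theorem outerA_eq_outerB (n fuel : Nat) (a : List Int) (m : List String)
    (hn : a.length = n) : outerA n fuel a m = outerB n fuel a m := by
  induction fuel generalizing a m with
  | zero => rfl
  | succ fuel ih =>
    rw [outerA, outerB, innerA_eq_innerB n 0 a m false hn]
    have hl := innerB_length n 0 a m false hn
    cases hib : innerB n 0 a m false with
    | mk a' rest =>
      cases rest with
      | mk m' sw =>
        simp only []
        cases sw
        · rfl
        · exact ih a' m' (by rw [hib] at hl; exact hl)

-- ===== VERDICT (by name: the statement is the Claim_ definition above) =====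
theorem solve_spec : Claim_equal_solve := by
  intro vec _
  unfold Spec_solve solve solve_alt
  simp only []
  by_cases h : vec.length ≤ 1
  · rw [if_pos h, if_pos h]
  · rw [if_neg h, if_neg h, outerA_eq_outerB vec.length vec.length vec [] rfl]
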